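-- pv_equiv track=rewrite | github.com/sasho132/softuni-courses | python_fundamentals_january_2022/lists_basics/21_list_manipulator.py | odds_finder
-- ===== SOURCE A (Python) =====
-- def odds_finder(numbers_list, max_or_min):
--     odds = [x for x in numbers_list if x % 2 != 0]
--     if len(odds) > 0:
--         if max_or_min == "max":
--             odd_max = max(odds)
--             indices = [index for index, item in enumerate(numbers_list) if item == odd_max]
--             return max(indices)
--
--         elif max_or_min == "min":
--             odd_min = min(odds)
--             indices = [index for index, item in enumerate(numbers_list) if item == odd_min]
--             return max(indices)
--     else:
--         return "No matches"
-- ===== SOURCE B (Python) =====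
-- def odds_finder(numbers_list, max_or_min):
--     best = None
--     last = -1
--     for index, item in enumerate(numbers_list):
--         if item % 2 != 0:
--             if best is None or (item > best if max_or_min == "max" else item < best):
--                 best = item
--                 last = index
--             elif item == best:
--                 last = index
--     if best is None:
--         return "No matches"
--     if max_or_min == "max" or max_or_min == "min":
--         return last
--     return None
-- ===== Notes on version B (the rewrite author's own statement) =====
-- stated objective: alternative
-- what changed: One single pass maintaining the running extreme odd and the last index where it occurs, instead of A's multi-pass scheme (filter the odds, max/min over them, collect all matching indices, max over the indices).
-- outside the precondition, e.g. on odds_finder([2, 4], 'max'): A returns 'No matches', B returns 'No matches'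
import Mathlib
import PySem

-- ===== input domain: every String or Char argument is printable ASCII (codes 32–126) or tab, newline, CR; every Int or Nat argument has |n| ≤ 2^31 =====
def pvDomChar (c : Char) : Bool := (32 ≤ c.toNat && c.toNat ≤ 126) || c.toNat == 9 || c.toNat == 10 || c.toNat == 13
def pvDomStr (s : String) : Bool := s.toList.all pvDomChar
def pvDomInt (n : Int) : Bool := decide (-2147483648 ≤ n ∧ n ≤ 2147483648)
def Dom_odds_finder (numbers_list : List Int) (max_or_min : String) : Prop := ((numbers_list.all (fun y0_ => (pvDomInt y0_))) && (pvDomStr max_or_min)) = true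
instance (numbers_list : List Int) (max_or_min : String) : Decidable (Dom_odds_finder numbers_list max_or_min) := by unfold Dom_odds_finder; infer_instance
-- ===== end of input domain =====

-- B replaces A's multi-pass scheme (filter the odds, max/min over them, collect matching
-- indices, max over the indices) by one single pass maintaining the running extreme odd
-- and the last index where it occurs.

-- the shared odd test 'x % 2 != 0' (exact: Python % with positive divisor = PySem.Int.mod)
def oddI (x : Int) : Bool := PySem.Int.mod x 2 != 0

-- ===== PORT A =====
def odds_finder (numbers_list : List Int) (max_or_min : String) : Option Int :=
  let odds := numbers_list.filter oddI
  if odds.length > 0 then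
    if max_or_min == "max" then
      match PySem.List.max? odds (fun y => y) with
      | some odd_max =>
        let indices := ((PySem.List.enumerate numbers_list).filter (fun p => p.2 == odd_max)).map (·.1)
        PySem.List.max? indices (fun y => y)
      | none => none   -- unreachable: odds ≠ []
    else if max_or_min == "min" then
      match PySem.List.min? odds (fun y => y) with
      | some odd_min =>
        let indices := ((PySem.List.enumerate numbers_list).filter (fun p => p.2 == odd_min)).map (·.1)
        PySem.List.max? indices (fun y => y)
      | none => none   -- unreachable: odds ≠ []
    else none          -- Python falls through and returns None
  else none            -- Python returns the string "No matches": outside Pre_odds_finder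

-- ===== PORT B =====
-- Python's conditional expression 'item > best if max_or_min == "max" else item < best'
def better (max_or_min : String) (b x : Int) : Bool :=
  if max_or_min == "max" then b < x else x < b

-- loop body of Source B: state = (best, last)
def bStep (max_or_min : String) (s : Option Int × Int) (p : Int × Int) : Option Int × Int :=
  if oddI p.2 then
    match s.1 with
    | none => (some p.2, p.1)
    | some b =>
      if better max_or_min b p.2 then (some p.2, p.1)
      else if p.2 == b then (some b, p.1)
      else s
  else s

def odds_finder_alt (numbers_list : List Int) (max_or_min : String) : Option Int :=
  let s := (PySem.List.enumerate numbers_list).foldl (bStep max_or_min) (none, -1)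
  match s.1 with
  | none => none   -- Python Source B returns the string "No matches" here: outside Pre_odds_finder
  | some _ => if max_or_min == "max" || max_or_min == "min" then some s.2 else none

-- ===== PRECONDITION & SPEC =====
-- Pre_ excludes lists with no odd element: there A returns the string "No matches",
-- which is not a value of the declared return type Option Int.
def Pre_odds_finder (numbers_list : List Int) (max_or_min : String) : Prop :=
  numbers_list.any oddI = true
instance (numbers_list : List Int) (max_or_min : String) : Decidable (Pre_odds_finder numbers_list max_or_min) := by unfold Pre_odds_finder; infer_instance
def pvWitness_odds_finder : List Int × String := ([1, 2, 3, 3, 2], "max")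

def Spec_odds_finder (numbers_list : List Int) (max_or_min : String) (out : Option Int) : Prop := out = odds_finder_alt numbers_list max_or_min
instance (numbers_list : List Int) (max_or_min : String) (out : Option Int) : Decidable (Spec_odds_finder numbers_list max_or_min out) := by unfold Spec_odds_finder; infer_instance

-- ===== CLAIM (what is proved, stated in full; the proofs are below) =====
def Claim_equal_odds_finder : Prop := ∀ (numbers_list : List Int) (max_or_min : String), Dom_odds_finder numbers_list max_or_min → Pre_odds_finder numbers_list max_or_min → Spec_odds_finder numbers_list max_or_min (odds_finder numbers_list max_or_min)

-- ===== LEMMAS AND PROOFS =====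

-- the running extreme of Source B's loop, over the odds only
def runB (m : String) (b : Int) (l : List Int) : Int :=
  l.foldl (fun b x => if better m b x then x else b) b

-- last index (offset s0) in xs of an odd element equal to v, default d
def lastIdxF (s0 : Int) (xs : List Int) (v : Int) (d : Int) : Int :=
  match xs with
  | [] => d
  | x :: t => lastIdxF (s0 + 1) t v (if oddI x && x == v then s0 else d)

theorem runB_mem (m : String) (b : Int) (l : List Int) :
    runB m b l = b ∨ runB m b l ∈ l := by
  induction l generalizing b with
  | nil => left; rfl
  | cons x t ih =>
    have h := ih (if better m b x then x else b)
    simp only [runB, List.foldl_cons] at h ⊢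
    rcases h with h | h
    · rw [h]; split
      · right; simp
      · left; rfl
    · right; exact List.mem_cons_of_mem _ h

theorem lastIdxF_dflt (s0 : Int) (xs : List Int) (v : Int) (d1 d2 : Int)
    (h : ∃ y ∈ xs, oddI y = true ∧ y = v) :
    lastIdxF s0 xs v d1 = lastIdxF s0 xs v d2 := by
  induction xs generalizing s0 d1 d2 with
  | nil => simp at h
  | cons x t ih =>
    simp only [lastIdxF]
    rcases h with ⟨y, hy, ho, hv⟩
    rcases List.mem_cons.mp hy with rfl | hyt
    · subst hv; simp [ho]
    · exact ih (s0 + 1) _ _ ⟨y, hyt, ho, hv⟩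

theorem lastIdxF_dflt_congr (s0 : Int) (xs : List Int) (v : Int) (d1 d2 : Int)
    (h : d1 = d2 ∨ ∃ y ∈ xs, oddI y = true ∧ y = v) :
    lastIdxF s0 xs v d1 = lastIdxF s0 xs v d2 := by
  rcases h with rfl | h
  · rfl
  · exact lastIdxF_dflt s0 xs v d1 d2 h

-- loop invariant, state already 'some b'
theorem foldl_bStep_some (m : String) (xs : List Int) (s0 : Int) (b last : Int) :
    (PySem.List.enumerate xs s0).foldl (bStep m) (some b, last)
      = (some (runB m b (xs.filter oddI)),
         lastIdxF s0 xs (runB m b (xs.filter oddI)) last) := by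
  induction xs generalizing s0 b last with
  | nil => simp [runB, lastIdxF]
  | cons x t ih =>
    rw [PySem.List.enumerate_cons, List.foldl_cons]
    by_cases hodd : oddI x = true
    · have hfil : (x :: t).filter oddI = x :: t.filter oddI := by simp [hodd]
      rw [hfil]
      have hrun : runB m b (x :: t.filter oddI)
          = runB m (if better m b x then x else b) (t.filter oddI) := by
        simp [runB]
      have hattain : ∀ b0 : Int, runB m b0 (t.filter oddI) = b0 ∨
          ∃ y ∈ t, oddI y = true ∧ y = runB m b0 (t.filter oddI) := by
        intro b0
        rcases runB_mem m b0 (t.filter oddI) with h | h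
        · exact Or.inl h
        · exact Or.inr ⟨_, (List.mem_filter.mp h).1, (List.mem_filter.mp h).2, rfl⟩
      by_cases hb : better m b x = true
      · have hstep : bStep m (some b, last) (s0, x) = (some x, s0) := by
          simp [bStep, hodd, hb]
        rw [hstep, ih, hrun, if_pos hb]
        simp only [lastIdxF, hodd, Bool.true_and]
        refine congrArg (Prod.mk _) (lastIdxF_dflt_congr _ _ _ _ _ ?_)
        by_cases hxv : x = runB m x (t.filter oddI)
        · left; simp [← hxv]
        · rcases hattain x with h | h
          · exact absurd h.symm hxv
          · exact Or.inr h
      · by_cases hxb : x = b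
        · subst hxb
          have hstep : bStep m (some x, last) (s0, x) = (some x, s0) := by
            simp [bStep, hodd, hb]
          rw [hstep, ih, hrun, if_neg (by simp [hb])]
          simp only [lastIdxF, hodd, Bool.true_and]
          refine congrArg (Prod.mk _) (lastIdxF_dflt_congr _ _ _ _ _ ?_)
          by_cases hxv : x = runB m x (t.filter oddI)
          · left; simp [← hxv]
          · rcases hattain x with h | h
            · exact absurd h.symm hxv
            · exact Or.inr h
        · have hstep : bStep m (some b, last) (s0, x) = (some b, last) := by
            simp [bStep, hodd, hb, hxb]
          rw [hstep, ih, hrun, if_neg (by simp [hb])]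
          simp only [lastIdxF, hodd, Bool.true_and]
          refine congrArg (Prod.mk _) (lastIdxF_dflt_congr _ _ _ _ _ ?_)
          by_cases hxv : x = runB m b (t.filter oddI)
          · rcases hattain b with h | h
            · exact absurd (hxv.trans h) hxb
            · exact Or.inr h
          · left; simp [hxv]
    · have hstep : bStep m (some b, last) (s0, x) = (some b, last) := by
        simp [bStep, hodd]
      have hfil : (x :: t).filter oddI = t.filter oddI := by
        simp [List.filter_cons, hodd]
      rw [hstep, ih, hfil]
      simp [lastIdxF, hodd]

-- from the initial 'none' state
theorem foldl_bStep_main (m : String) (xs : List Int) (s0 last : Int) (hd : Int) (tl : List Int)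
    (hfil : xs.filter oddI = hd :: tl) :
    (PySem.List.enumerate xs s0).foldl (bStep m) (none, last)
      = (some (runB m hd tl), lastIdxF s0 xs (runB m hd tl) last) := by
  induction xs generalizing s0 last with
  | nil => simp at hfil
  | cons x t ih =>
    rw [PySem.List.enumerate_cons, List.foldl_cons]
    by_cases hodd : oddI x = true
    · have hc : (x :: t).filter oddI = x :: t.filter oddI := by simp [hodd]
      rw [hc] at hfil
      injection hfil with h1 h2
      subst h1; subst h2
      have hstep : bStep m (none, last) (s0, x) = (some x, s0) := by
        simp [bStep, hodd]
      rw [hstep, foldl_bStep_some]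
      simp only [lastIdxF, hodd, Bool.true_and]
      refine congrArg (Prod.mk _) (lastIdxF_dflt_congr _ _ _ _ _ ?_)
      by_cases hxv : x = runB m x (t.filter oddI)
      · left; simp [← hxv]
      · rcases runB_mem m x (t.filter oddI) with h | h
        · exact absurd h.symm hxv
        · exact Or.inr ⟨_, (List.mem_filter.mp h).1, (List.mem_filter.mp h).2, rfl⟩
    · have hfil' : t.filter oddI = hd :: tl := by
        simpa [List.filter_cons, hodd] using hfil
      have hstep : bStep m (none, last) (s0, x) = (none, last) := by
        simp [bStep, hodd]
      rw [hstep, ih _ _ hfil']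
      simp [lastIdxF, hodd]

-- Python's max over a strictly increasing list is its last element
theorem foldl_max_pairwise (t : List Int) (x : Int)
    (hp : t.Pairwise (· < ·)) (hx : ∀ y ∈ t, x < y) :
    t.foldl max x = (x :: t).getLast (by simp) := by
  induction t generalizing x with
  | nil => simp
  | cons y t' ih =>
    have hxy : max x y = y := max_eq_right (le_of_lt (hx y (by simp)))
    rw [List.foldl_cons, hxy, ih y (List.pairwise_cons.mp hp).2 (List.pairwise_cons.mp hp).1]
    cases t' <;> simp [List.getLast]

theorem max?_pairwise (l : List Int) (hp : l.Pairwise (· < ·)) :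
    PySem.List.max? l (fun y => y) = l.getLast? := by
  cases l with
  | nil => simp [PySem.List.max?_eq_none_iff]
  | cons x t =>
    rw [PySem.List.max?_id_cons,
        foldl_max_pairwise t x (List.pairwise_cons.mp hp).2 (List.pairwise_cons.mp hp).1]
    simp [List.getLast?_eq_some_getLast]

-- lastIdxF is the last collected index (or the default)
theorem lastIdxF_getLast (xs : List Int) (v : Int) :
    ∀ (s0 d : Int), lastIdxF s0 xs v d
      = ((((PySem.List.enumerate xs s0).filter (fun p => oddI p.2 && p.2 == v)).map (·.1)).getLast?).getD d := by
  induction xs with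
  | nil => intro s0 d; simp [lastIdxF, PySem.List.enumerate_nil]
  | cons x t ih =>
    intro s0 d
    rw [PySem.List.enumerate_cons]
    simp only [lastIdxF, List.filter_cons]
    by_cases hx : (oddI x && x == v) = true
    · simp only [hx, if_true, List.map_cons]
      rw [ih (s0 + 1) s0]
      cases hlist : ((PySem.List.enumerate t (s0+1)).filter (fun p => oddI p.2 && p.2 == v)).map (·.1) with
      | nil => simp [hlist]
      | cons a l =>
        obtain ⟨w, hw⟩ : ∃ w, (a :: l).getLast? = some w :=
          ⟨(a :: l).getLast (by simp), List.getLast?_eq_getLast (by simp)⟩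
        simp [hlist, List.getLast?_cons_cons, hw]
    · rw [Bool.not_eq_true] at hx
      simp only [hx, Bool.false_eq_true, if_false]
      exact ih (s0 + 1) d

theorem indices_pairwise (xs : List Int) (s0 : Int) (p : Int × Int → Bool) :
    (((PySem.List.enumerate xs s0).filter p).map (·.1)).Pairwise (· < ·) := by
  apply List.Pairwise.map
  · exact fun a b h => h
  · exact (PySem.List.pairwise_lt_enumerate xs s0).filter p

theorem runB_max (b : Int) (l : List Int) : runB "max" b l = l.foldl max b := by
  induction l generalizing b with
  | nil => rfl
  | cons x t ih =>
    have hbx : (if better "max" b x = true then x else b) = max b x := by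
      by_cases h : b < x
      · simp [better, h, max_eq_right (le_of_lt h)]
      · simp [better, h, max_eq_left (le_of_not_gt h)]
    simp only [runB, List.foldl_cons, hbx]
    simpa [runB] using ih (max b x)

theorem runB_min (b : Int) (l : List Int) : runB "min" b l = l.foldl min b := by
  induction l generalizing b with
  | nil => rfl
  | cons x t ih =>
    have hbx : (if better "min" b x = true then x else b) = min b x := by
      by_cases h : x < b
      · simp [better, h, min_eq_right (le_of_lt h)]
      · simp [better, h, min_eq_left (le_of_not_gt h)]
    simp only [runB, List.foldl_cons, hbx]
    simpa [runB] using ih (min b x)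

-- ===== VERDICT (by name: the statement is the Claim_ definition above) =====
theorem odds_finder_spec : Claim_equal_odds_finder := by
  intro xs m _hdom hpre
  unfold Spec_odds_finder
  have hne : xs.filter oddI ≠ [] := by
    have hpre' : xs.any oddI = true := hpre
    simp only [List.any_eq_true] at hpre'
    obtain ⟨y, hy, ho⟩ := hpre'
    exact List.ne_nil_of_mem (List.mem_filter.mpr ⟨hy, ho⟩)
  obtain ⟨hd, tl, hfil⟩ : ∃ hd tl, xs.filter oddI = hd :: tl := by
    cases h : xs.filter oddI with
    | nil => exact absurd h hne
    | cons a l => exact ⟨a, l, rfl⟩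
  have hB := foldl_bStep_main m xs 0 (-1) hd tl hfil
  set v := runB m hd tl with hv
  have hv_odds : v ∈ xs.filter oddI := by
    rcases runB_mem m hd tl with h | h
    · rw [hfil, hv, h]; exact List.mem_cons_self
    · rw [hfil]; exact List.mem_cons_of_mem _ h
  have hv_odd : oddI v = true := (List.mem_filter.mp hv_odds).2
  have hv_xs : v ∈ xs := (List.mem_filter.mp hv_odds).1
  have hfeq : (PySem.List.enumerate xs).filter (fun p => p.2 == v)
      = (PySem.List.enumerate xs).filter (fun p => oddI p.2 && p.2 == v) := by
    apply List.filter_congr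
    intro p _
    by_cases h : p.2 = v
    · simp [h, hv_odd]
    · simp [h]
  have hnonempty : ((PySem.List.enumerate xs).filter (fun p => p.2 == v)).map (·.1) ≠ [] := by
    obtain ⟨k, hk, hkeq⟩ := List.mem_iff_getElem.mp hv_xs
    have hpmem : ((0 : Int) + k, v) ∈ PySem.List.enumerate xs 0 := by
      rw [PySem.List.mem_enumerate_iff]
      exact ⟨k, hk, by rw [hkeq]⟩
    have hmem2 : ((0 : Int) + k, v) ∈ (PySem.List.enumerate xs).filter (fun p => p.2 == v) :=
      List.mem_filter.mpr ⟨hpmem, by simp⟩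
    intro hc
    have := List.mem_map_of_mem (f := (·.1)) hmem2
    rw [hc] at this; simp at this
  obtain ⟨w, hw⟩ : ∃ w, (((PySem.List.enumerate xs).filter (fun p => p.2 == v)).map (·.1)).getLast? = some w := by
    cases hgl : (((PySem.List.enumerate xs).filter (fun p => p.2 == v)).map (·.1)).getLast? with
    | none => exact absurd (List.getLast?_eq_none_iff.mp hgl) hnonempty
    | some w => exact ⟨w, rfl⟩
  have hL : lastIdxF 0 xs v (-1) = w := by
    rw [lastIdxF_getLast, ← hfeq, hw]; rfl
  have hBval : odds_finder_alt xs m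
      = if m == "max" || m == "min" then some w else none := by
    simp only [odds_finder_alt, hB, hL]
  rw [hBval]
  by_cases hmax : m == "max"
  · have hm : m = "max" := by simpa using hmax
    subst hm
    have hvmax : PySem.List.max? (hd :: tl) (fun y => y) = some v := by
      rw [PySem.List.max?_id_cons, hv, runB_max]
    simp only [odds_finder, hfil, hvmax, List.length_cons]
    rw [if_pos (Nat.succ_pos _), if_pos (by decide)]
    rw [max?_pairwise _ (indices_pairwise xs 0 _), hw]
    simp
  · by_cases hmin : m == "min"
    · have hm : m = "min" := by simpa using hmin
      subst hm
      have hvmin : PySem.List.min? (hd :: tl) (fun y => y) = some v := by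
        rw [PySem.List.min?_id_cons, hv, runB_min]
      simp only [odds_finder, hfil, hvmin, List.length_cons]
      rw [if_pos (Nat.succ_pos _)]
      rw [if_neg (by decide), if_pos (by decide)]
      rw [max?_pairwise _ (indices_pairwise xs 0 _), hw]
      simp
    · simp only [odds_finder, hfil, List.length_cons]
      rw [if_pos (Nat.succ_pos _)]
      rw [if_neg (by simpa using hmax), if_neg (by simpa using hmin)]
      simp [hmax, hmin]
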